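-- pv_equiv track=rewrite | github.com/Innopolis-tensor-compression/tensor-compression-methods | src/utils/benchmark/calculate_bounds.py | calculate_tt_bounds
-- ===== SOURCE A (Python) =====
-- def calculate_tt_bounds(shape: tuple | list) -> list:
--     """
--     Calculate the bounds for TT-ranks of a tensor based on its shape.
--
--     Parameters
--     ----------
--     shape : tuple[int, ...] | list[int]
--         The shape of the tensor as a list or tuple of integers.
--         Each element represents the size of the tensor along a corresponding dimension.
--
--     Returns
--     -------
--     list[tuple[int, int]]
--         A list of rank bounds for the Tensor Train (TT) decomposition.
--         Each element is a tuple (r_min, r_max), where: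
--         - r_min is always 1.
--         - r_max is the upper bound for the TT-rank at the corresponding position.
--
--     Examples
--     --------
--     >>> res = calculate_tt_bounds((3, 4, 5))
--     [(1, 1), (1, 3), (1, 12), (1, 1)]
--
--     """
--     d = len(shape)
--     bounds = [(1, 1)]
--
--     for k in range(1, d):
--         prod_left = 1
--         for i in range(k):
--             prod_left *= shape[i]
--
--         prod_right = 1
--         for j in range(k, d):
--             prod_right *= shape[j]
--
--         rk_max = min(prod_left, prod_right)
--         bounds.append((1, rk_max))
--
--     bounds.append((1, 1))
--     return bounds
-- ===== SOURCE B (Python) =====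
-- def calculate_tt_bounds(shape: tuple | list) -> list:
--     """One pass of suffix products + one pass of prefix products (O(d)),
--     instead of recomputing both products from scratch for every k (O(d^2))."""
--     d = len(shape)
--     suf = [1]
--     for x in reversed(shape):
--         suf.append(x * suf[-1])
--     suf.reverse()  # suf[k] == product of shape[k:]
--     pre = [1]
--     for x in shape:
--         pre.append(pre[-1] * x)  # pre[k] == product of shape[:k]
--     return [(1, 1)] + [(1, min(pre[k], suf[k])) for k in range(1, d)] + [(1, 1)]
-- ===== Notes on version B (the rewrite author's own statement) =====
-- stated objective: faster
-- what changed: Replaces A's per-k nested loops that recompute the left and right products from scratch by a single suffix-product pass plus a single running-prefix pass, then pairs them up.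
import Mathlib
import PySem

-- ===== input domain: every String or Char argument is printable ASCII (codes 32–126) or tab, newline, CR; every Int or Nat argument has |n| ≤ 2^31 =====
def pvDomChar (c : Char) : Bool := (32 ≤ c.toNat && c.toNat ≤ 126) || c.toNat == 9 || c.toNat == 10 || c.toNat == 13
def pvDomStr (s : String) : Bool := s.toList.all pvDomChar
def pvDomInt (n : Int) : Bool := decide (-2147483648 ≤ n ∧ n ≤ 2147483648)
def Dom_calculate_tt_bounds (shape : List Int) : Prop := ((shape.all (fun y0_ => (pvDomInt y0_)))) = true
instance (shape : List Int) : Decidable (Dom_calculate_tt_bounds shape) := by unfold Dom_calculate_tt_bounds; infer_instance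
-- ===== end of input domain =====

-- B replaces A's O(d^2) nested product loops by one suffix-product pass and one
-- prefix-product pass (O(d)); return values are proved identical on all inputs.

-- ===== PORT A =====
def calculate_tt_bounds (shape : List Int) : List (Int × Int) :=
  let d : Int := shape.length
  let bounds : List (Int × Int) := [(1, 1)]
  let bounds := (PySem.List.pyRange 1 d 1).foldl (fun bounds k =>
    let prod_left := (PySem.List.pyRange 0 k 1).foldl
      (fun p i => p * PySem.List.pyGetD shape i 0) 1   -- shape[i], index always in range
    let prod_right := (PySem.List.pyRange k d 1).foldl
      (fun p j => p * PySem.List.pyGetD shape j 0) 1   -- shape[j], index always in range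
    bounds ++ [(1, min prod_left prod_right)]) bounds
  bounds ++ [(1, 1)]

-- ===== PORT B =====
def calculate_tt_bounds_alt (shape : List Int) : List (Int × Int) :=
  let d : Int := shape.length
  let suf := (shape.reverse.foldl
    (fun suf x => suf ++ [x * PySem.List.pyGetD suf (-1) 0]) [1]).reverse  -- suf[-1]: list never empty
  let pre := shape.foldl
    (fun pre x => pre ++ [PySem.List.pyGetD pre (-1) 0 * x]) ([1] : List Int)
  [((1 : Int), (1 : Int))]
    ++ (PySem.List.pyRange 1 d 1).map
        (fun k => ((1 : Int), min (PySem.List.pyGetD pre k 0) (PySem.List.pyGetD suf k 0)))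
    ++ [(1, 1)]

-- ===== PRECONDITION & SPEC =====
def Spec_calculate_tt_bounds (shape : List Int) (out : List (Int × Int)) : Prop := out = calculate_tt_bounds_alt shape
instance (shape : List Int) (out : List (Int × Int)) : Decidable (Spec_calculate_tt_bounds shape out) := by unfold Spec_calculate_tt_bounds; infer_instance

-- ===== CLAIM (what is proved, stated in full; the proofs are below) =====
def Claim_equal_calculate_tt_bounds : Prop := ∀ (shape : List Int), Dom_calculate_tt_bounds shape → Spec_calculate_tt_bounds shape (calculate_tt_bounds shape)

-- ===== LEMMAS AND PROOFS =====

-- the prefix-product pass builds the list of products of all prefixes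
theorem preFold_eq (shape : List Int) :
    shape.foldl (fun pre x => pre ++ [PySem.List.pyGetD pre (-1) 0 * x]) ([1] : List Int)
      = (List.range (shape.length + 1)).map (fun k => (shape.take k).prod) := by
  induction shape using List.reverseRecOn with
  | nil => simp
  | append_singleton ys x ih =>
    rw [List.foldl_append, ih]
    have hlast : ((List.range (ys.length + 1)).map (fun k => (ys.take k).prod))
        = ((List.range ys.length).map (fun k => (ys.take k).prod)) ++ [ys.prod] := by
      rw [List.range_succ, List.map_append]; simp
    simp only [List.foldl_cons, List.foldl_nil, hlast,
      PySem.List.pyGetD_neg_one_append_singleton]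
    rw [← hlast]
    have hR : (List.range ((ys ++ [x]).length + 1)).map (fun k => ((ys ++ [x]).take k).prod)
        = (List.range (ys.length + 1)).map (fun k => (ys.take k).prod) ++ [(ys ++ [x]).prod] := by
      rw [show (ys ++ [x]).length + 1 = (ys.length + 1) + 1 by simp, List.range_succ,
        List.map_append]
      congr 1
      · apply List.map_congr_left
        intro k hk
        rw [List.mem_range] at hk
        rw [List.take_append_of_le_length (by omega)]
      · simp [List.take_of_length_le]
    rw [hR]
    simp [List.prod_append]

-- the suffix-product pass (before the final reverse) builds, over the reversed
-- shape, the list of products of all its prefixes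
theorem sufFold_eq (rs : List Int) :
    rs.foldl (fun suf x => suf ++ [x * PySem.List.pyGetD suf (-1) 0]) ([1] : List Int)
      = (List.range (rs.length + 1)).map (fun k => (rs.take k).prod) := by
  induction rs using List.reverseRecOn with
  | nil => simp
  | append_singleton ys x ih =>
    rw [List.foldl_append, ih]
    have hlast : ((List.range (ys.length + 1)).map (fun k => (ys.take k).prod))
        = ((List.range ys.length).map (fun k => (ys.take k).prod)) ++ [ys.prod] := by
      rw [List.range_succ, List.map_append]; simp
    simp only [List.foldl_cons, List.foldl_nil, hlast,
      PySem.List.pyGetD_neg_one_append_singleton]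
    rw [← hlast]
    have hR : (List.range ((ys ++ [x]).length + 1)).map (fun k => ((ys ++ [x]).take k).prod)
        = (List.range (ys.length + 1)).map (fun k => (ys.take k).prod) ++ [(ys ++ [x]).prod] := by
      rw [show (ys ++ [x]).length + 1 = (ys.length + 1) + 1 by simp, List.range_succ,
        List.map_append]
      congr 1
      · apply List.map_congr_left
        intro k hk
        rw [List.mem_range] at hk
        rw [List.take_append_of_le_length (by omega)]
      · simp [List.take_of_length_le]
    rw [hR]
    simp [List.prod_append, mul_comm]

-- ===== VERDICT (by name: the statement is the Claim_ definition above) =====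
theorem calculate_tt_bounds_spec : Claim_equal_calculate_tt_bounds := by
  intro shape _
  unfold Spec_calculate_tt_bounds calculate_tt_bounds calculate_tt_bounds_alt
  simp only [preFold_eq, sufFold_eq, PySem.List.foldl_append_singleton_eq_map]
  rw [List.append_assoc]
  apply congrArg (fun l => [((1:Int),(1:Int))] ++ l)
  apply congrArg (fun l => l ++ [((1:Int),(1:Int))])
  apply List.map_congr_left
  intro k hk
  rw [PySem.List.mem_pyRange_one] at hk
  obtain ⟨hk1, hk2⟩ := hk
  have hkt : (k.toNat : Int) = k := Int.toNat_of_nonneg (by omega)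
  have htn : k.toNat < shape.length := by omega
  -- A's inner left loop is the product of the k-element prefix
  have hpl : (PySem.List.pyRange 0 k 1).foldl (fun p i => p * PySem.List.pyGetD shape i 0) 1
      = (shape.take k.toNat).prod := by
    have hlen : ((shape.take k.toNat).length : Int) = k := by
      simp [List.length_take]; omega
    have hcongr : (PySem.List.pyRange 0 k 1).foldl (fun p i => p * PySem.List.pyGetD shape i 0) 1
        = (PySem.List.pyRange 0 ((shape.take k.toNat).length : Int) 1).foldl
            (fun p i => p * PySem.List.pyGetD (shape.take k.toNat) i 0) 1 := by
      rw [hlen]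
      apply PySem.List.foldl_congr_mem
      intro acc i hi
      rw [PySem.List.mem_pyRange_one] at hi
      rw [PySem.List.pyGetD_eq_getElem shape 0 (by omega) (by omega),
        PySem.List.pyGetD_eq_getElem (shape.take k.toNat) 0 (by omega)
          (by simp [List.length_take]; omega)]
      rw [List.getElem_take]
    rw [hcongr, PySem.List.foldl_pyRange_zero_pyGetD' (shape.take k.toNat) 0 (· * ·) 1,
      ← List.prod_eq_foldl]
  -- A's inner right loop is the product of the suffix from k
  have hpr : (PySem.List.pyRange k shape.length 1).foldl
        (fun p j => p * PySem.List.pyGetD shape j 0) 1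
      = (shape.drop k.toNat).prod := by
    rw [PySem.List.foldl_pyRange_pyGetD' shape 0 (· * ·) 1 (by omega), ← List.prod_eq_foldl]
  -- B's pre[k] is the same prefix product
  have hpre : PySem.List.pyGetD
        ((List.range (shape.length + 1)).map (fun j => (shape.take j).prod)) k 0
      = (shape.take k.toNat).prod := by
    rw [PySem.List.pyGetD_eq_getElem _ 0 (by omega) (by simp; omega)]
    simp
  -- B's suf[k] is the same suffix product
  have hsuf : PySem.List.pyGetD
        (((List.range (shape.reverse.length + 1)).map
            (fun j => (shape.reverse.take j).prod)).reverse) k 0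
      = (shape.drop k.toNat).prod := by
    rw [PySem.List.pyGetD_eq_getElem _ 0 (by omega) (by simp; omega)]
    rw [List.getElem_reverse]
    have h1 : ((List.range (shape.reverse.length + 1)).map
        (fun j => (shape.reverse.take j).prod)).length - 1 - k.toNat
        = shape.length - k.toNat := by simp
    simp only [h1, List.getElem_map, List.getElem_range]
    rw [List.take_reverse]
    have h2 : shape.length - (shape.length - k.toNat) = k.toNat := by omega
    rw [h2, List.prod_reverse]
  rw [hpl, hpr, hpre, hsuf]
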